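-- pv_equiv track=rewrite | github.com/tanmaik/AI | Unit 2/NQueens/Green2_NQueens_Incremental.py | get_sorted_values
-- ===== SOURCE A (Python) =====
-- def get_sorted_values(state, var):
--     non_allowed = set()
--     allowed = [x for x in range(len(state))]
--     vals = []
--     for index, elem in enumerate(state):
--         if elem is not None:
--             non_allowed.add(elem)
--             non_allowed.add(abs(var - index) + elem)
--             non_allowed.add(elem - abs(var - index))
--     for n in non_allowed:
--         if n >= 0 and n < len(state):
--             allowed.remove(n)
--     return allowed
-- ===== SOURCE B (Python) =====
-- def get_sorted_values(state, var):
--     vals = []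
--     for v in range(len(state)):
--         if not any(elem is not None
--                    and (v == elem or abs(var - index) == abs(v - elem))
--                    for index, elem in enumerate(state)):
--             vals.append(v)
--     return vals
-- ===== Notes on version B (the rewrite author's own statement) =====
-- stated objective: alternative
-- what changed: Replaces A's forbidden-value set construction plus list.remove subtraction with a direct generate-and-test: each candidate column is checked against every placed queen for column/diagonal conflict and appended only if safe.
import Mathlib
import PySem

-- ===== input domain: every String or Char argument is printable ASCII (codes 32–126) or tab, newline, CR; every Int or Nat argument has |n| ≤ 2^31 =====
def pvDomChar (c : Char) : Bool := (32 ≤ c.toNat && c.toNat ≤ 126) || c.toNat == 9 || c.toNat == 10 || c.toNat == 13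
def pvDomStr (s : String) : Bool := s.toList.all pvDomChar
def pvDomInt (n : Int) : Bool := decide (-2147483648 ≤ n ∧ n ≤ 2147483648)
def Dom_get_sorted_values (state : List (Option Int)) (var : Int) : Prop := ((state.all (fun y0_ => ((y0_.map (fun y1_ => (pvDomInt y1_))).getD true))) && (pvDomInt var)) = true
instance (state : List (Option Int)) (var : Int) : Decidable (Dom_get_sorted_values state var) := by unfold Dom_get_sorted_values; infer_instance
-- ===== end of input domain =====

-- B replaces A's forbidden-value set + list.remove subtraction with a direct
-- per-candidate conflict test against every placed queen (alternative decomposition, same cost).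

-- ===== PORT A =====
-- Python A iterates the set 'non_allowed' in hash order; the fold below iterates it in
-- insertion order. The final list is the same: the removed values are distinct and the
-- list 'allowed' has no duplicates, so the removal order does not matter.
-- 'allowed.remove(n)' can never raise here (the guard keeps n inside the nodup range),
-- so '(remove? …).getD allowed' is exact.
def get_sorted_values (state : List (Option Int)) (var : Int) : List Int :=
  let non_allowed : PySem.Set Int :=
    (PySem.List.enumerate state 0).foldl (fun s p =>
      match p.2 with
      | some elem =>
          PySem.Set.add (PySem.Set.add (PySem.Set.add s elem)
            (((var - p.1).natAbs : Int) + elem)) (elem - ((var - p.1).natAbs : Int))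
      | none => s) PySem.Set.empty
  let allowed : List Int := PySem.List.pyRange 0 (state.length : Int) 1
  non_allowed.foldl (fun allowed n =>
    if n ≥ 0 ∧ n < (state.length : Int) then (PySem.List.remove? allowed n).getD allowed
    else allowed) allowed

-- ===== PORT B =====
def get_sorted_values_alt (state : List (Option Int)) (var : Int) : List Int :=
  (PySem.List.pyRange 0 (state.length : Int) 1).foldl (fun vals v =>
    if !((PySem.List.enumerate state 0).any (fun p =>
          match p.2 with
          | some elem => v == elem || ((var - p.1).natAbs : Int) == ((v - elem).natAbs : Int)
          | none => false))
    then vals ++ [v] else vals) []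

-- ===== PRECONDITION & SPEC =====
def Spec_get_sorted_values (state : List (Option Int)) (var : Int) (out : List Int) : Prop := out = get_sorted_values_alt state var
instance (state : List (Option Int)) (var : Int) (out : List Int) : Decidable (Spec_get_sorted_values state var out) := by unfold Spec_get_sorted_values; infer_instance

-- ===== CLAIM (what is proved, stated in full; the proofs are below) =====
def Claim_equal_get_sorted_values : Prop := ∀ (state : List (Option Int)) (var : Int), Dom_get_sorted_values state var → Spec_get_sorted_values state var (get_sorted_values state var)

-- ===== LEMMAS AND PROOFS =====

-- Folding guarded remove? over a list of values, starting from a nodup list, is a filter.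
theorem foldl_remove_eq_filter (p : Int → Prop) [DecidablePred p] (ns l : List Int)
    (hl : l.Nodup) :
    ns.foldl (fun acc n => if p n then (PySem.List.remove? acc n).getD acc else acc) l
      = l.filter (fun v => ns.all (fun n => !(decide (p n) && (v == n)))) := by
  induction ns generalizing l with
  | nil => simp
  | cons n ns ih =>
    simp only [List.foldl_cons]
    by_cases hp : p n
    · have hstep : (PySem.List.remove? l n).getD l = l.filter (fun v => !(v == n)) := by
        by_cases hn : n ∈ l
        · rw [PySem.List.remove?_eq_some_erase l n hn]
          rw [Option.getD_some, List.Nodup.erase_eq_filter hl]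
          apply List.filter_congr
          intro a _
          simp [bne]
        · rw [(PySem.List.remove?_eq_none_iff l n).mpr hn, Option.getD_none]
          symm
          apply List.filter_eq_self.mpr
          intro a ha
          simp only [Bool.not_eq_eq_eq_not, Bool.not_true, beq_eq_false_iff_ne, ne_eq]
          exact fun h => hn (h ▸ ha)
      rw [if_pos hp, hstep, ih _ (List.Nodup.filter _ hl), List.filter_filter]
      apply List.filter_congr
      intro a _
      simp [hp, Bool.and_comm]
    · rw [if_neg hp, ih _ hl]
      apply List.filter_congr
      intro a _
      simp [hp]

-- Membership in A's forbidden set.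
theorem mem_fold_add (var : Int) (l : List (Int × Option Int)) (s : PySem.Set Int) (x : Int) :
    x ∈ l.foldl (fun s p =>
      match p.2 with
      | some elem =>
          PySem.Set.add (PySem.Set.add (PySem.Set.add s elem)
            (((var - p.1).natAbs : Int) + elem)) (elem - ((var - p.1).natAbs : Int))
      | none => s) s
    ↔ x ∈ s ∨ ∃ p ∈ l, ∃ e, p.2 = some e ∧
        (x = e ∨ x = ((var - p.1).natAbs : Int) + e ∨ x = e - ((var - p.1).natAbs : Int)) := by
  induction l generalizing s with
  | nil => simp
  | cons q l ih =>
    rcases q with ⟨i, oe⟩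
    cases oe with
    | none =>
      simp only [List.foldl_cons]
      rw [ih]
      simp only [List.mem_cons]
      constructor
      · rintro (h | ⟨p, hp, he⟩)
        · exact Or.inl h
        · exact Or.inr ⟨p, Or.inr hp, he⟩
      · rintro (h | ⟨p, (rfl | hp), e, he, hx⟩)
        · exact Or.inl h
        · exact absurd he (by simp)
        · exact Or.inr ⟨p, hp, e, he, hx⟩
    | some e =>
      simp only [List.foldl_cons]
      rw [ih]
      simp only [PySem.Set.mem_add, List.mem_cons]
      constructor
      · rintro ((((h | rfl) | rfl) | rfl) | ⟨p, hp, he⟩)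
        · exact Or.inl h
        · exact Or.inr ⟨_, Or.inl rfl, _, rfl, by tauto⟩
        · exact Or.inr ⟨_, Or.inl rfl, _, rfl, by tauto⟩
        · exact Or.inr ⟨_, Or.inl rfl, _, rfl, by tauto⟩
        · exact Or.inr ⟨p, Or.inr hp, he⟩
      · rintro (h | ⟨p, (rfl | hp), e', he', hx⟩)
        · exact Or.inl (Or.inl (Or.inl (Or.inl h)))
        · simp only [Option.some.injEq] at he'
          subst he'
          rcases hx with rfl | rfl | rfl
          · exact Or.inl (Or.inl (Or.inl (Or.inr rfl)))
          · exact Or.inl (Or.inl (Or.inr rfl))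
          · exact Or.inl (Or.inr rfl)
        · exact Or.inr ⟨p, hp, e', he', hx⟩

theorem get_sorted_values_eq (state : List (Option Int)) (var : Int) :
    get_sorted_values state var = get_sorted_values_alt state var := by
  simp only [get_sorted_values, get_sorted_values_alt]
  rw [PySem.List.foldl_append_if_eq_filter]
  rw [foldl_remove_eq_filter (fun n => n ≥ 0 ∧ n < (state.length : Int)) _ _
        (PySem.List.nodup_pyRange_one 0 (state.length : Int))]
  rw [List.nil_append]
  apply List.filter_congr
  intro v hv
  rw [PySem.List.mem_pyRange_one] at hv
  rw [Bool.eq_iff_iff]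
  simp only [List.all_eq_true, Bool.not_eq_true', List.any_eq_false,
    Bool.and_eq_false_iff, decide_eq_false_iff_not, beq_eq_false_iff_ne, ne_eq]
  constructor
  · -- no forbidden value in range equals v  ⇒  no queen conflicts with v
    intro h p hp
    rcases p with ⟨i, oe⟩
    cases oe with
    | none => simp
    | some e =>
      simp only [Bool.or_eq_true, beq_iff_eq, not_or]
      have hmem := fun hc => (mem_fold_add var (PySem.List.enumerate state 0) PySem.Set.empty v).mpr
        (Or.inr ⟨(i, some e), hp, e, rfl, hc⟩)
      constructor
      · intro hve
        rcases h v (hmem (Or.inl hve)) with h' | h'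
        · exact h' ⟨hv.1, hv.2⟩
        · exact h' rfl
      · intro habs
        have hc : v = ((var - i).natAbs : Int) + e ∨ v = e - ((var - i).natAbs : Int) := by omega
        rcases h v (hmem (Or.inr hc)) with h' | h'
        · exact h' ⟨hv.1, hv.2⟩
        · exact h' rfl
  · -- no queen conflicts with v  ⇒  no forbidden value in range equals v
    intro h n hn
    by_cases hvn : v = n
    · subst hvn
      rcases (mem_fold_add var (PySem.List.enumerate state 0) PySem.Set.empty v).mp hn with
        habs | ⟨p, hp, e, he, hx⟩
      · exact absurd habs (by simp [PySem.Set.empty])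
      · have hq := h p hp
        rcases p with ⟨i, oe⟩
        simp only at he
        subst he
        simp only [Bool.or_eq_true, beq_iff_eq, not_or] at hq
        rcases hx with hx | hx | hx
        · exact absurd hx hq.1
        · exact absurd (by omega : ((var - i).natAbs : Int) = ((v - e).natAbs : Int)) hq.2
        · exact absurd (by omega : ((var - i).natAbs : Int) = ((v - e).natAbs : Int)) hq.2
    · exact Or.inr hvn

-- ===== VERDICT (by name: the statement is the Claim_ definition above) =====
theorem get_sorted_values_spec : Claim_equal_get_sorted_values := by
  intro state var _
  unfold Spec_get_sorted_values
  exact get_sorted_values_eq state var
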